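-- pv_equiv track=rewrite | github.com/Luke20000429/EECS486-Ethnicity-Identifier | trigram.py | trainBigramLanguageModel
-- ===== SOURCE A (Python) =====
-- def trainBigramLanguageModel(bidicts, chardicts, pair):
--     name, nation = pair
--     if name[0] in chardicts[nation].keys():
--         chardicts[nation][name[0]] += 1
--     else:
--         chardicts[nation][name[0]] = 1
--
--     for i in range(1, len(name)):
--         bi = name[i-1:i+1]
--         char = name[i]
--         if char in chardicts[nation].keys():
--             chardicts[nation][char] += 1
--         else:
--             chardicts[nation][char] = 1
--         if bi in bidicts[nation].keys():
--             bidicts[nation][bi] += 1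
--         else:
--             bidicts[nation][bi] = 1
--
--     return bidicts, chardicts
-- ===== SOURCE B (Python) =====
-- def trainBigramLanguageModel(bidicts, chardicts, pair):
--     name, nation = pair
--     # aggregate local frequency tables first
--     charcounts = {}
--     for c in name:
--         charcounts[c] = charcounts.get(c, 0) + 1
--     bicounts = {}
--     for a, b in zip(name, name[1:]):
--         bicounts[a + b] = bicounts.get(a + b, 0) + 1
--     # then merge each table into the shared dicts, one batched update per distinct key
--     for c, k in charcounts.items():
--         chardicts[nation][c] = chardicts[nation].get(c, 0) + k
--     for bi, k in bicounts.items():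
--         bidicts[nation][bi] = bidicts[nation].get(bi, 0) + k
--     return bidicts, chardicts
-- ===== Notes on version B (the rewrite author's own statement) =====
-- stated objective: alternative
-- what changed: A interleaves per-occurrence conditional increments (membership test, then += 1 or = 1) directly into the shared nation dicts inside one index loop; B is aggregate-then-merge: it first builds two local frequency tables (a char counter over the name and a bigram counter over zip(name, name[1:])) and only then merges each table into the shared dicts with a single batched += count per distinct key, in first-occurrence order.
-- crash fix: On an empty name A raises IndexError on name[0]; B counts nothing and returns the two dicts unchanged. — e.g. on trainBigramLanguageModel([("x", [])], [("y", [("a", 1)])], ("", "x")): A raises IndexError, B returns ([("x", [])], [("y", [("a", 1)])])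
import Mathlib
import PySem

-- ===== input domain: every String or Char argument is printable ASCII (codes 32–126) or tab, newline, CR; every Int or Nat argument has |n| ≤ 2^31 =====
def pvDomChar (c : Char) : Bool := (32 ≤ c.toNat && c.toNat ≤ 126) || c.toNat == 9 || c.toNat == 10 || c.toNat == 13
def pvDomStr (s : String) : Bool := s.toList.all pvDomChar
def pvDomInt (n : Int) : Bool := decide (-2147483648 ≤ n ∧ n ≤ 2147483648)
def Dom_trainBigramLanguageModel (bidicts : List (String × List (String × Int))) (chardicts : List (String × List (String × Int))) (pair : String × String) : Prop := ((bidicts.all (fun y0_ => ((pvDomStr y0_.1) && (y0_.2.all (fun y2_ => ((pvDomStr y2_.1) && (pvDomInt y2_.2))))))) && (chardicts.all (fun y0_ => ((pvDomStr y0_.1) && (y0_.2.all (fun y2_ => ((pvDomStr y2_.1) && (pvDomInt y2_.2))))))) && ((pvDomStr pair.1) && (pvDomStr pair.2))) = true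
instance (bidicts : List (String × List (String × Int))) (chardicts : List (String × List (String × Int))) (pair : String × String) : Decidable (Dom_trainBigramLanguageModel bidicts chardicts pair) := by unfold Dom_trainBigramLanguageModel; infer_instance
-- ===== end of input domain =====

-- B replaces A's per-occurrence conditional increments (one interleaved index loop over the name)
-- by aggregate-then-merge: it first builds local frequency tables (a char counter and a bigram
-- counter), then merges each table into the shared dicts with one batched += count per DISTINCT
-- key; same cost, a genuinely different data flow. Both Pythons mutate the passed-in dicts in
-- place and return them; the equivalence proved here is about the returned value.

-- Shared representation shims: the signature's association lists viewed as PySem.Dicts and back.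
def pvToD (l : List (String × List (String × Int))) : PySem.Dict String (PySem.Dict String Int) :=
  ⟨l.map (fun p => (p.1, ⟨p.2⟩))⟩
def pvOfD (d : PySem.Dict String (PySem.Dict String Int)) : List (String × List (String × Int)) :=
  d.items.map (fun p => (p.1, p.2.items))

-- ===== PORT A =====
-- 'if char in d.keys(): d[char] += 1 else: d[char] = 1'
def pvBumpA (d : PySem.Dict String Int) (k : String) : PySem.Dict String Int :=
  if d.contains k then d.modify k 0 (· + 1) else d.insert k 1

def trainBigramLanguageModel (bidicts : List (String × List (String × Int))) (chardicts : List (String × List (String × Int))) (pair : String × String) : (List (String × List (String × Int))) × (List (String × List (String × Int))) :=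
  let name := pair.1.toList
  let nation := pair.2
  let bds := pvToD bidicts
  let cds := pvToD chardicts
  match name with
  | [] => (bidicts, chardicts)  -- name[0] raises IndexError in Python; excluded by Pre_
  | c0 :: _ =>
    -- head-character branch before the loop
    let cds := cds.modify nation ⟨[]⟩ (fun d => pvBumpA d (String.ofList [c0]))
    -- for i in range(1, len(name)):
    let r := (PySem.List.pyRange 1 (name.length : Int) 1).foldl
      (fun (st : PySem.Dict String (PySem.Dict String Int) × PySem.Dict String (PySem.Dict String Int)) i =>
        let bi := String.ofList (PySem.List.slice name (some (i - 1)) (some (i + 1)))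
        let ch := String.ofList [PySem.List.pyGetD name i ' ']
        let cs := st.2.modify nation ⟨[]⟩ (fun d => pvBumpA d ch)
        let bs := st.1.modify nation ⟨[]⟩ (fun d => pvBumpA d bi)
        (bs, cs))
      (bds, cds)
    (pvOfD r.1, pvOfD r.2)

-- ===== PORT B =====
-- 'd[k] = d.get(k, 0) + 1'
def pvBumpB (d : PySem.Dict String Int) (k : String) : PySem.Dict String Int :=
  d.insert k (d.getD k 0 + 1)

def trainBigramLanguageModel_alt (bidicts : List (String × List (String × Int))) (chardicts : List (String × List (String × Int))) (pair : String × String) : (List (String × List (String × Int))) × (List (String × List (String × Int))) :=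
  let name := pair.1.toList
  let nation := pair.2
  -- aggregate local frequency tables first
  let charcounts := name.foldl (fun d c => pvBumpB d (String.ofList [c])) PySem.Dict.empty
  let bicounts := (name.zip name.tail).foldl (fun d p => pvBumpB d (String.ofList [p.1, p.2])) PySem.Dict.empty
  -- then merge each table into the shared dicts, one batched update per distinct key
  let cds := charcounts.items.foldl
    (fun (C : PySem.Dict String (PySem.Dict String Int)) p =>
      C.modify nation ⟨[]⟩ (fun d => d.insert p.1 (d.getD p.1 0 + p.2))) (pvToD chardicts)
  let bds := bicounts.items.foldl
    (fun (C : PySem.Dict String (PySem.Dict String Int)) p =>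
      C.modify nation ⟨[]⟩ (fun d => d.insert p.1 (d.getD p.1 0 + p.2))) (pvToD bidicts)
  (pvOfD bds, pvOfD cds)

-- ===== PRECONDITION & SPEC =====
-- Pre_ excludes exactly the inputs on which the Python A raises: an empty name (IndexError on
-- name[0]), nation missing from chardicts (KeyError), and nation missing from bidicts when the
-- name has at least one bigram (KeyError; with len(name) <= 1 A never touches bidicts[nation]).
def Pre_trainBigramLanguageModel (bidicts : List (String × List (String × Int))) (chardicts : List (String × List (String × Int))) (pair : String × String) : Prop :=
  pair.1.toList ≠ [] ∧ pair.2 ∈ chardicts.map Prod.fst ∧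
    (pair.1.toList.length ≤ 1 ∨ pair.2 ∈ bidicts.map Prod.fst)
instance (bidicts : List (String × List (String × Int))) (chardicts : List (String × List (String × Int))) (pair : String × String) : Decidable (Pre_trainBigramLanguageModel bidicts chardicts pair) := by unfold Pre_trainBigramLanguageModel; infer_instance

def pvWitness_trainBigramLanguageModel : (List (String × List (String × Int))) × (List (String × List (String × Int))) × (String × String) :=
  ([("x", [("ab", 1)])], [("x", [("a", 2)])], ("ab", "x"))

-- On an empty name A raises IndexError on name[0]; B counts nothing and returns the dicts unchanged.
def Raises_trainBigramLanguageModel (bidicts : List (String × List (String × Int))) (chardicts : List (String × List (String × Int))) (pair : String × String) : Prop :=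
  pair.1.toList = []
instance (bidicts : List (String × List (String × Int))) (chardicts : List (String × List (String × Int))) (pair : String × String) : Decidable (Raises_trainBigramLanguageModel bidicts chardicts pair) := by unfold Raises_trainBigramLanguageModel; infer_instance
def pvRaiseWitness_trainBigramLanguageModel : (List (String × List (String × Int))) × (List (String × List (String × Int))) × (String × String) :=
  ([("x", [])], [("y", [("a", 1)])], ("", "x"))
def pvRaiseWitnessOut_trainBigramLanguageModel : (List (String × List (String × Int))) × (List (String × List (String × Int))) :=
  ([("x", [])], [("y", [("a", 1)])])

def Spec_trainBigramLanguageModel (bidicts : List (String × List (String × Int))) (chardicts : List (String × List (String × Int))) (pair : String × String) (out : (List (String × List (String × Int))) × (List (String × List (String × Int)))) : Prop := out = trainBigramLanguageModel_alt bidicts chardicts pair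
instance (bidicts : List (String × List (String × Int))) (chardicts : List (String × List (String × Int))) (pair : String × String) (out : (List (String × List (String × Int))) × (List (String × List (String × Int)))) : Decidable (Spec_trainBigramLanguageModel bidicts chardicts pair out) := by unfold Spec_trainBigramLanguageModel; infer_instance

-- ===== CLAIM (what is proved, stated in full; the proofs are below) =====
def Claim_equal_trainBigramLanguageModel : Prop := ∀ (bidicts : List (String × List (String × Int))) (chardicts : List (String × List (String × Int))) (pair : String × String), Dom_trainBigramLanguageModel bidicts chardicts pair → Pre_trainBigramLanguageModel bidicts chardicts pair → Spec_trainBigramLanguageModel bidicts chardicts pair (trainBigramLanguageModel bidicts chardicts pair)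
def Claim_raises_trainBigramLanguageModel : Prop := (∀ (bidicts : List (String × List (String × Int))) (chardicts : List (String × List (String × Int))) (pair : String × String), Dom_trainBigramLanguageModel bidicts chardicts pair → Raises_trainBigramLanguageModel bidicts chardicts pair → ¬ Pre_trainBigramLanguageModel bidicts chardicts pair) ∧ (Dom_trainBigramLanguageModel (pvRaiseWitness_trainBigramLanguageModel.1) (pvRaiseWitness_trainBigramLanguageModel.2.1) (pvRaiseWitness_trainBigramLanguageModel.2.2) ∧ Raises_trainBigramLanguageModel (pvRaiseWitness_trainBigramLanguageModel.1) (pvRaiseWitness_trainBigramLanguageModel.2.1) (pvRaiseWitness_trainBigramLanguageModel.2.2) ∧ trainBigramLanguageModel_alt (pvRaiseWitness_trainBigramLanguageModel.1) (pvRaiseWitness_trainBigramLanguageModel.2.1) (pvRaiseWitness_trainBigramLanguageModel.2.2) = pvRaiseWitnessOut_trainBigramLanguageModel)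

-- ===== LEMMAS AND PROOFS =====

-- The two increment idioms agree on the inner dict.
lemma pvBumpA_eq_pvBumpB (d : PySem.Dict String Int) (k : String) : pvBumpA d k = pvBumpB d k := by
  unfold pvBumpA pvBumpB PySem.Dict.modify
  split
  · rfl
  · next h =>
    have h0 : PySem.Dict.getD d k 0 = 0 := by
      unfold PySem.Dict.getD
      rw [(PySem.Dict.get?_eq_none_iff_contains d k).2 (by simpa using h)]
      rfl
    rw [h0, zero_add]

-- Two inserts at distinct keys commute when the first key is already present.
lemma pv_insert_comm (d : PySem.Dict String Int) (x k : String)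
    (hx : d.contains x = true) (hne : k ≠ x) (a u : Int) :
    (d.insert x a).insert k u = (d.insert k u).insert x a := by
  have hcx : (d.insert k u).contains x = true := by
    rw [PySem.Dict.contains_insert]; simp [hx]
  by_cases hk : d.contains k = true
  · have hck : (d.insert x a).contains k = true := by
      rw [PySem.Dict.contains_insert]; simp [hk]
    apply PySem.Dict.ext
    rw [PySem.Dict.items_insert_of_contains _ _ hck,
        PySem.Dict.items_insert_of_contains _ _ hx,
        PySem.Dict.items_insert_of_contains _ _ hcx,
        PySem.Dict.items_insert_of_contains _ _ hk]
    simp only [List.map_map]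
    apply List.map_congr_left
    intro p _
    by_cases hpx : p.1 = x
    · simp [Function.comp, hpx, Ne.symm hne]
    · by_cases hpk : p.1 = k
      · simp [Function.comp, hpk, hne]
      · simp [Function.comp, hpx, hpk]
  · have hk' : d.contains k = false := by simpa using hk
    have hck : (d.insert x a).contains k = false := by
      rw [PySem.Dict.contains_insert]
      simp [hne, hk']
    apply PySem.Dict.ext
    rw [PySem.Dict.items_insert_of_not_contains _ _ hck,
        PySem.Dict.items_insert_of_contains _ _ hx,
        PySem.Dict.items_insert_of_contains _ _ hcx,
        PySem.Dict.items_insert_of_not_contains _ _ hk']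
    simp [hne]

lemma pv_merge_bump (l : List (String × Int)) (x : String) (hxl : ∀ p ∈ l, p.1 ≠ x) :
    ∀ (e : PySem.Dict String Int), e.contains x = true →
      l.foldl (fun d p => d.insert p.1 (d.getD p.1 0 + p.2)) (e.insert x (e.getD x 0 + 1))
        = (l.foldl (fun d p => d.insert p.1 (d.getD p.1 0 + p.2)) e).insert x
            ((l.foldl (fun d p => d.insert p.1 (d.getD p.1 0 + p.2)) e).getD x 0 + 1) := by
  induction l with
  | nil => intro e _; rfl
  | cons p t ih =>
    intro e hx
    have hpk : p.1 ≠ x := hxl p (by simp)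
    simp only [List.foldl_cons]
    have hg : (e.insert x (e.getD x 0 + 1)).getD p.1 0 = e.getD p.1 0 :=
      PySem.Dict.getD_insert_of_ne e _ _ hpk
    rw [hg]
    have hcomm : (e.insert x (e.getD x 0 + 1)).insert p.1 (e.getD p.1 0 + p.2)
        = (e.insert p.1 (e.getD p.1 0 + p.2)).insert x
            ((e.insert p.1 (e.getD p.1 0 + p.2)).getD x 0 + 1) := by
      rw [pv_insert_comm e x p.1 hx hpk,
          PySem.Dict.getD_insert_of_ne _ _ _ (Ne.symm hpk)]
    rw [hcomm]
    exact ih (fun q hq => hxl q (by simp [hq])) _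
      (by rw [PySem.Dict.contains_insert]; simp [hx])

lemma pv_merge_counter (xs : List String) (d : PySem.Dict String Int) :
    (PySem.Dict.counter xs).items.foldl (fun d p => d.insert p.1 (d.getD p.1 0 + p.2)) d
      = xs.foldl (fun d k => d.insert k (d.getD k 0 + 1)) d := by
  induction xs using List.reverseRecOn with
  | nil => rfl
  | append_singleton xs x ih =>
    rw [List.foldl_append, List.foldl_cons, List.foldl_nil,
        PySem.Dict.items_counter, PySem.Set.ofList_append_singleton]
    by_cases hmem : x ∈ xs
    · have hmem' : x ∈ PySem.Set.ofList xs := (PySem.Set.mem_ofList xs x).2 hmem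
      rw [PySem.Set.add_of_mem hmem']
      obtain ⟨l1, l2, hsplit⟩ := List.append_of_mem hmem'
      have hnd : (l1 ++ x :: l2).Nodup := hsplit ▸ PySem.Set.nodup_ofList xs
      have hx1 : x ∉ l1 ∧ x ∉ l2 := by
        have := List.nodup_middle.1 hnd
        have h2 := (List.nodup_cons.1 this).1
        simp only [List.mem_append] at h2
        exact ⟨fun h => h2 (Or.inl h), fun h => h2 (Or.inr h)⟩
      rw [hsplit]
      have hmap : ∀ (l : List String), x ∉ l →
          l.map (fun k => (k, ((xs ++ [x]).count k : Int)))
            = l.map (fun k => (k, (xs.count k : Int))) := by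
        intro l hl
        apply List.map_congr_left
        intro a ha
        have hax : a ≠ x := fun h => hl (h ▸ ha)
        simp [List.count_append, Ne.symm hax]
      rw [List.map_append, List.map_cons, hmap l1 hx1.1, hmap l2 hx1.2]
      have hcx : ((xs ++ [x]).count x : Int) = (xs.count x : Int) + 1 := by
        simp [List.count_append]
      rw [hcx]
      -- now both sides: fold over l1-part, then the x entry, then l2-part
      rw [List.foldl_append, List.foldl_cons]
      -- RHS via ih
      rw [← ih, PySem.Dict.items_counter, hsplit, List.map_append, List.map_cons,
          List.foldl_append, List.foldl_cons]
      set d1 := (l1.map (fun k => (k, (xs.count k : Int)))).foldl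
          (fun d p => d.insert p.1 (d.getD p.1 0 + p.2)) d with hd1
      set w := d1.getD x 0 + (xs.count x : Int) with hw
      have he1 : d1.insert x (d1.getD x 0 + ((xs.count x : Int) + 1))
          = (d1.insert x w).insert x ((d1.insert x w).getD x 0 + 1) := by
        rw [PySem.Dict.getD_insert_self, PySem.Dict.insert_insert_self, hw]
        ring_nf
      rw [he1]
      have hl2x : ∀ p ∈ l2.map (fun k => (k, (xs.count k : Int))), p.1 ≠ x := by
        intro p hp
        obtain ⟨a, ha, rfl⟩ := List.mem_map.1 hp
        exact fun h => hx1.2 (h ▸ ha)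
      exact pv_merge_bump _ x hl2x (d1.insert x w) (PySem.Dict.contains_insert_self d1 x w)
    · have hmem' : x ∉ PySem.Set.ofList xs := fun h => hmem ((PySem.Set.mem_ofList xs x).1 h)
      rw [PySem.Set.add_of_not_mem hmem']
      have hmap : (PySem.Set.ofList xs).map (fun k => (k, ((xs ++ [x]).count k : Int)))
          = (PySem.Set.ofList xs).map (fun k => (k, (xs.count k : Int))) := by
        apply List.map_congr_left
        intro a ha
        have hax : a ≠ x := fun h => hmem' (h ▸ ha)
        simp [List.count_append, Ne.symm hax]
      rw [List.map_append, hmap, List.map_cons]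
      have hcx : ((xs ++ [x]).count x : Int) = 1 := by
        simp [List.count_append, List.count_eq_zero_of_not_mem hmem]
      rw [hcx, List.foldl_append, List.foldl_cons]
      simp only [List.map_nil, List.foldl_nil]
      rw [← ih, PySem.Dict.items_counter]


-- A chain of in-place modifies of one key, started by an insert, is one insert of the folded value.
lemma foldl_modify_insert {β : Type} (k : String)
    (u : PySem.Dict String Int → β → PySem.Dict String Int) (xs : List β)
    (D : PySem.Dict String (PySem.Dict String Int)) (v : PySem.Dict String Int) :
    xs.foldl (fun (E : PySem.Dict String (PySem.Dict String Int)) x =>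
        E.modify k ⟨[]⟩ (fun d => u d x)) (D.insert k v)
      = D.insert k (xs.foldl u v) := by
  induction xs generalizing v with
  | nil => rfl
  | cons x t ih =>
    simp only [List.foldl_cons]
    have hstep : (D.insert k v).modify k ⟨[]⟩ (fun d => u d x) = D.insert k (u v x) := by
      unfold PySem.Dict.modify
      rw [PySem.Dict.getD_insert_self, PySem.Dict.insert_insert_self]
    rw [hstep, ih]

-- A chain of in-place modifies of one key over a NONEMPTY list is one insert of the folded value.
lemma pv_chain_fold {β : Type} (nation : String)
    (u : PySem.Dict String Int → β → PySem.Dict String Int) (xs : List β)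
    (C : PySem.Dict String (PySem.Dict String Int)) (h : xs ≠ []) :
    xs.foldl (fun (E : PySem.Dict String (PySem.Dict String Int)) x =>
        E.modify nation ⟨[]⟩ (fun d => u d x)) C
      = C.insert nation (xs.foldl u (C.getD nation ⟨[]⟩)) := by
  cases xs with
  | nil => exact absurd rfl h
  | cons x t =>
    simp only [List.foldl_cons]
    have hstep : C.modify nation ⟨[]⟩ (fun d => u d x)
        = C.insert nation (u (C.getD nation ⟨[]⟩) x) := rfl
    rw [hstep, foldl_modify_insert]

lemma counter_items_ne_nil (ks : List String) (h : ks ≠ []) :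
    (PySem.Dict.counter ks).items ≠ [] := by
  intro hit
  have hk : (PySem.Dict.counter ks).keys = [] := by
    simp [PySem.Dict.keys, hit]
  rw [PySem.Dict.keys_counter] at hk
  cases ks with
  | nil => exact h rfl
  | cons a t => rw [PySem.Set.ofList_cons] at hk; exact List.cons_ne_nil _ _ hk


-- The indexed character loop 'for i in range(1, len(l)): … l[i] …' is a fold over l.tail.
lemma char_fold {β : Type} (f : β → Char → β) (l : List Char) (s : β) :
    (PySem.List.pyRange 1 (l.length : Int) 1).foldl
        (fun acc i => f acc (PySem.List.pyGetD l i ' ')) s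
      = l.tail.foldl f s := by
  have h := PySem.List.foldl_pyRange_pyGetD' l ' ' f s (a := 1) (by norm_num)
  simpa using h

lemma slice_window (l : List Char) (k : Nat) :
    PySem.List.slice l (some (1 + (k : Int) - 1)) (some (1 + (k : Int) + 1))
      = List.take 2 (List.drop k l) := by
  have h1 : (1 + (k : Int) - 1) = (k : Int) := by ring
  have h2 : (1 + (k : Int) + 1) = ((k + 2 : Nat) : Int) := by push_cast; ring
  rw [h1, h2, PySem.List.slice_toNat l (by positivity) (by positivity)]
  simp
  omega

-- windows of width 2 over indices = fold over zip(l, l.tail)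
lemma range_window_zip {β : Type} (g : β → List Char → β) :
    ∀ (l : List Char) (s : β),
    (List.range (l.length - 1)).foldl (fun acc k => g acc (List.take 2 (List.drop k l))) s
      = (l.zip l.tail).foldl (fun acc p => g acc [p.1, p.2]) s := by
  intro l
  induction l with
  | nil => intro s; rfl
  | cons x t ih =>
    cases t with
    | nil => intro s; rfl
    | cons y t2 =>
      intro s
      have hr : List.range ((x :: y :: t2).length - 1)
          = 0 :: (List.range ((y :: t2).length - 1)).map (· + 1) := by
        simp [List.range_succ_eq_map]
      rw [hr]
      simp only [List.foldl_cons, List.foldl_map, List.drop_zero, List.drop_succ_cons,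
        List.take_succ_cons, List.take_zero]
      have := ih (g s [x, y])
      simpa using this

-- The sliced bigram loop 'for i in range(1, len(l)): … l[i-1:i+1] …' is a fold over zip(l, l.tail).
lemma bigram_fold {β : Type} (g : β → List Char → β) (l : List Char) (s : β) :
    (PySem.List.pyRange 1 (l.length : Int) 1).foldl
        (fun acc i => g acc (PySem.List.slice l (some (i - 1)) (some (i + 1)))) s
      = (l.zip l.tail).foldl (fun acc p => g acc [p.1, p.2]) s := by
  rw [PySem.List.pyRange_one, List.foldl_map]
  have hn : ((l.length : Int) - 1).toNat = l.length - 1 := by omega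
  rw [hn]
  simp only [slice_window]
  exact range_window_zip g l s

-- ===== VERDICT (by name: the statement is the Claim_ definition above) =====
theorem trainBigramLanguageModel_spec : Claim_equal_trainBigramLanguageModel := by
  intro bidicts chardicts pair _ hpre
  obtain ⟨hne, -, -⟩ := hpre
  unfold Spec_trainBigramLanguageModel trainBigramLanguageModel trainBigramLanguageModel_alt
  cases hl : pair.1.toList with
  | nil => exact absurd hl hne
  | cons c0 rest =>
    simp only
    rw [PySem.List.foldl_prod_mk
      (f := fun (b : PySem.Dict String (PySem.Dict String Int)) (i : Int) =>
        b.modify pair.2 ⟨[]⟩ (fun d =>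
          pvBumpA d (String.ofList (PySem.List.slice (c0 :: rest) (some (i - 1)) (some (i + 1))))))
      (g := fun (c : PySem.Dict String (PySem.Dict String Int)) (i : Int) =>
        c.modify pair.2 ⟨[]⟩ (fun d =>
          pvBumpA d (String.ofList [PySem.List.pyGetD (c0 :: rest) i ' '])))]
    -- name's characters as singleton strings, and its bigrams
    have hA_c :
        (PySem.List.pyRange 1 ((c0 :: rest).length : Int) 1).foldl
            (fun (C : PySem.Dict String (PySem.Dict String Int)) i =>
              C.modify pair.2 ⟨[]⟩ (fun d =>
                pvBumpA d (String.ofList [PySem.List.pyGetD (c0 :: rest) i ' '])))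
            ((pvToD chardicts).modify pair.2 ⟨[]⟩ (fun d => pvBumpA d (String.ofList [c0])))
          = (pvToD chardicts).insert pair.2
              ((c0 :: rest).foldl (fun d c => pvBumpB d (String.ofList [c]))
                ((pvToD chardicts).getD pair.2 ⟨[]⟩)) := by
      rw [char_fold (fun (C : PySem.Dict String (PySem.Dict String Int)) c =>
        C.modify pair.2 ⟨[]⟩ (fun d => pvBumpA d (String.ofList [c])))]
      have : (c0 :: rest).foldl
          (fun (C : PySem.Dict String (PySem.Dict String Int)) c =>
            C.modify pair.2 ⟨[]⟩ (fun d => pvBumpA d (String.ofList [c]))) (pvToD chardicts)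
          = (pvToD chardicts).insert pair.2
              ((c0 :: rest).foldl (fun d c => pvBumpA d (String.ofList [c]))
                ((pvToD chardicts).getD pair.2 ⟨[]⟩)) :=
        pv_chain_fold pair.2 (fun d c => pvBumpA d (String.ofList [c])) (c0 :: rest)
          (pvToD chardicts) (List.cons_ne_nil _ _)
      simp only [List.foldl_cons] at this
      simp only [List.tail_cons]
      rw [this]
      simp only [pvBumpA_eq_pvBumpB, List.foldl_cons]
    have hB_c :
        ((c0 :: rest).foldl (fun d c => pvBumpB d (String.ofList [c])) PySem.Dict.empty).items.foldl
            (fun (C : PySem.Dict String (PySem.Dict String Int)) p =>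
              C.modify pair.2 ⟨[]⟩ (fun d => d.insert p.1 (d.getD p.1 0 + p.2))) (pvToD chardicts)
          = (pvToD chardicts).insert pair.2
              ((c0 :: rest).foldl (fun d c => pvBumpB d (String.ofList [c]))
                ((pvToD chardicts).getD pair.2 ⟨[]⟩)) := by
      have hcnt : (c0 :: rest).foldl (fun d c => pvBumpB d (String.ofList [c])) PySem.Dict.empty
          = PySem.Dict.counter ((c0 :: rest).map (fun c => String.ofList [c])) := by
        rw [← PySem.Dict.foldl_insert_getD_add_one_eq_counter, List.foldl_map]
        rfl
      rw [hcnt, pv_chain_fold pair.2 (fun d p => d.insert p.1 (d.getD p.1 0 + p.2)) _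
            (pvToD chardicts) (counter_items_ne_nil _ (by simp)),
          pv_merge_counter, List.foldl_map]
      rfl
    have hzip :
        (PySem.List.pyRange 1 ((c0 :: rest).length : Int) 1).foldl
            (fun (C : PySem.Dict String (PySem.Dict String Int)) i =>
              C.modify pair.2 ⟨[]⟩ (fun d =>
                pvBumpA d (String.ofList (PySem.List.slice (c0 :: rest) (some (i - 1)) (some (i + 1))))))
            (pvToD bidicts)
          = ((c0 :: rest).zip rest).foldl
              (fun (C : PySem.Dict String (PySem.Dict String Int)) p =>
                C.modify pair.2 ⟨[]⟩ (fun d => pvBumpA d (String.ofList [p.1, p.2])))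
              (pvToD bidicts) := by
      have := bigram_fold (fun (C : PySem.Dict String (PySem.Dict String Int)) cs =>
        C.modify pair.2 ⟨[]⟩ (fun d => pvBumpA d (String.ofList cs))) (c0 :: rest) (pvToD bidicts)
      simpa using this
    have hB_cnt : ((c0 :: rest).zip rest).foldl
          (fun d p => pvBumpB d (String.ofList [p.1, p.2])) PySem.Dict.empty
        = PySem.Dict.counter (((c0 :: rest).zip rest).map (fun p => String.ofList [p.1, p.2])) := by
      rw [← PySem.Dict.foldl_insert_getD_add_one_eq_counter, List.foldl_map]
      rfl
    have hbi : ((c0 :: rest).zip rest).foldl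
          (fun (C : PySem.Dict String (PySem.Dict String Int)) p =>
            C.modify pair.2 ⟨[]⟩ (fun d => pvBumpA d (String.ofList [p.1, p.2])))
          (pvToD bidicts)
        = (((c0 :: rest).zip rest).foldl
            (fun d p => pvBumpB d (String.ofList [p.1, p.2])) PySem.Dict.empty).items.foldl
            (fun (C : PySem.Dict String (PySem.Dict String Int)) p =>
              C.modify pair.2 ⟨[]⟩ (fun d => d.insert p.1 (d.getD p.1 0 + p.2))) (pvToD bidicts) := by
      rw [hB_cnt]
      cases hz : (c0 :: rest).zip rest with
      | nil => rfl
      | cons z zt =>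
        have h1 := pv_chain_fold pair.2
          (fun d (p : Char × Char) => pvBumpA d (String.ofList [p.1, p.2])) (z :: zt)
          (pvToD bidicts) (List.cons_ne_nil _ _)
        have h2 := pv_chain_fold pair.2
          (fun (d : PySem.Dict String Int) (p : String × Int) => d.insert p.1 (d.getD p.1 0 + p.2))
          ((PySem.Dict.counter ((z :: zt).map (fun p => String.ofList [p.1, p.2]))).items)
          (pvToD bidicts) (counter_items_ne_nil _ (by simp))
        rw [h1, h2, pv_merge_counter, List.foldl_map]
        simp only [pvBumpA_eq_pvBumpB]
        rfl
    simp only [List.tail_cons] at *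
    rw [hA_c, hB_c, hzip, hbi]

@[simp]
theorem trainBigramLanguageModel_raises : Claim_raises_trainBigramLanguageModel := by
  unfold Claim_raises_trainBigramLanguageModel
  constructor
  · intro bidicts chardicts pair _ hr hp
    exact hp.1 hr
  · exact ⟨by decide, by decide, by decide⟩
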